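-- pv_equiv track=rewrite | github.com/miliar/Code_Jam_Webscraper | solutions_python/Problem_75/1233.py | combinan
-- ===== SOURCE A (Python) =====
-- def combinan(char1, char2, lista):
--     flag=False
--     res="false"
--     for x in lista:
--         if ((char1==x[0] and char2==x[1]) or (char2==x[0] and char1==x[1])):
--             flag=True
--             res=x[2]
--     return (flag, res)
-- ===== SOURCE B (Python) =====
-- def combinan(char1, char2, lista):
--     for x in reversed(lista):
--         if (char1 == x[0] and char2 == x[1]) or (char2 == x[0] and char1 == x[1]):
--             return (True, x[2])
--     return (False, "false")
-- ===== Notes on version B (the rewrite author's own statement) =====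
-- stated objective: simpler
-- what changed: Scans the list in reverse and returns immediately on the first match instead of folding accumulator state over the whole list.
import Mathlib
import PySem

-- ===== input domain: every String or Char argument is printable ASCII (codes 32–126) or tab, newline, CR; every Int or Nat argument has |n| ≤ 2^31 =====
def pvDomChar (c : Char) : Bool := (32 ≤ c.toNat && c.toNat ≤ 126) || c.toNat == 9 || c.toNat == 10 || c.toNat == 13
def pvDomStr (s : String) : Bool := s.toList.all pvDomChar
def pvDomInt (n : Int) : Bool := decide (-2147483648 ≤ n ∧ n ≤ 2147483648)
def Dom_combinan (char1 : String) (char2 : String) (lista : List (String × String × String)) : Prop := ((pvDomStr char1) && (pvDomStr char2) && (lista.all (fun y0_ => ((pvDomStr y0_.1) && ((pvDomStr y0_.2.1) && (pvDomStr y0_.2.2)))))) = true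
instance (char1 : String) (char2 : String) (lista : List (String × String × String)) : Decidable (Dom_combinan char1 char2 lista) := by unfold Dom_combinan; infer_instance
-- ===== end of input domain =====

-- B replaces A's whole-list fold with a reverse scan that returns on the first match (simpler, early exit; same result).
-- ===== PORT A =====
-- A: fold over the list keeping (flag, res), overwriting on every match.
def combinan (char1 : String) (char2 : String) (lista : List (String × String × String)) : Bool × String :=
  lista.foldl
    (fun st x =>
      if (char1 == x.1 && char2 == x.2.1) || (char2 == x.1 && char1 == x.2.1) then
        (true, x.2.2)
      else st)
    (false, "false")

-- ===== PORT B =====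
-- B: scan the reversed list, returning on the first match (simpler: no accumulator).
def combinanRevScan (char1 : String) (char2 : String) : List (String × String × String) → Bool × String
  | [] => (false, "false")
  | x :: xs =>
      if (char1 == x.1 && char2 == x.2.1) || (char2 == x.1 && char1 == x.2.1) then
        (true, x.2.2)
      else combinanRevScan char1 char2 xs

def combinan_alt (char1 : String) (char2 : String) (lista : List (String × String × String)) : Bool × String :=
  combinanRevScan char1 char2 lista.reverse

-- ===== PRECONDITION & SPEC =====
def Spec_combinan (char1 : String) (char2 : String) (lista : List (String × String × String)) (out : Bool × String) : Prop := out = combinan_alt char1 char2 lista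
instance (char1 : String) (char2 : String) (lista : List (String × String × String)) (out : Bool × String) : Decidable (Spec_combinan char1 char2 lista out) := by unfold Spec_combinan; infer_instance

-- ===== CLAIM (what is proved, stated in full; the proofs are below) =====
def Claim_equal_combinan : Prop := ∀ (char1 : String) (char2 : String) (lista : List (String × String × String)), Dom_combinan char1 char2 lista → Spec_combinan char1 char2 lista (combinan char1 char2 lista)

-- ===== LEMMAS AND PROOFS =====

-- ===== VERDICT (by name: the statement is the Claim_ definition above) =====
theorem combinanRevScan_no_match (char1 char2 : String) (l : List (String × String × String))
    (h : ∀ x ∈ l, ((char1 == x.1 && char2 == x.2.1) || (char2 == x.1 && char1 == x.2.1)) = false) :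
    combinanRevScan char1 char2 l = (false, "false") := by
  induction l with
  | nil => rfl
  | cons x xs ih =>
      simp only [combinanRevScan, h x (List.mem_cons_self ..)]
      exact ih (fun y hy => h y (List.mem_cons_of_mem _ hy))

theorem foldl_eq_revScan (char1 char2 : String) (l : List (String × String × String))
    (st : Bool × String) :
    l.foldl
      (fun st x =>
        if (char1 == x.1 && char2 == x.2.1) || (char2 == x.1 && char1 == x.2.1) then
          (true, x.2.2)
        else st) st
    = if l.any (fun x => (char1 == x.1 && char2 == x.2.1) || (char2 == x.1 && char1 == x.2.1)) then
        combinanRevScan char1 char2 l.reverse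
      else st := by
  induction l using List.reverseRecOn generalizing st with
  | nil => rfl
  | append_singleton l x ih =>
      rw [List.foldl_append, List.reverse_append]
      simp only [List.foldl_cons, List.foldl_nil, List.reverse_singleton, List.singleton_append,
        List.any_append, List.any_cons, List.any_nil, combinanRevScan]
      by_cases hx : ((char1 == x.1 && char2 == x.2.1) || (char2 == x.1 && char1 == x.2.1)) = true
      · simp [hx]
      · simp only [Bool.not_eq_true] at hx
        rw [hx]
        simp only [Bool.false_eq_true, if_false, Bool.or_false]
        exact ih st

theorem combinan_spec : Claim_equal_combinan := by
  intro char1 char2 lista _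
  unfold Spec_combinan combinan combinan_alt
  rw [foldl_eq_revScan]
  by_cases h : lista.any (fun x => (char1 == x.1 && char2 == x.2.1) || (char2 == x.1 && char1 == x.2.1)) = true
  · simp [h]
  · simp only [Bool.not_eq_true] at h
    have hr : combinanRevScan char1 char2 lista.reverse = (false, "false") := by
      apply combinanRevScan_no_match
      intro y hy
      rw [List.mem_reverse] at hy
      rw [List.any_eq_false] at h
      have := h y hy
      simpa using this
    simp [h, hr]
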